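-- pv_equiv track=rewrite | github.com/abilian/lewaf | tests/b_integration/test_crs_rule_parsing.py | parse_secrule_components
-- ===== SOURCE A (Python) =====
-- def parse_secrule_components(rule: str) -> dict:
--     """Parse a SecRule into its components."""
--     # Remove SecRule prefix
--     rule_content = rule[7:].strip()  # Remove 'SecRule '
--
--     # Find the operator (first quoted string) and actions (last quoted string)
--     components = {}
--
--     # Extract variables (everything before the first quote)
--     quote_pos = rule_content.find('"')
--     if quote_pos == -1:
--         return {"error": "No quoted sections found"}
--
--     variables = rule_content[:quote_pos].strip()
--     components["variables"] = variables
--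
--     # Extract operator and actions from quoted sections
--     quoted_parts = []
--     in_quote = False
--     current_quote = ""
--     i = 0
--
--     while i < len(rule_content):
--         char = rule_content[i]
--         if char == '"' and (i == 0 or rule_content[i - 1] != "\\"):
--             if in_quote:
--                 quoted_parts.append(current_quote)
--                 current_quote = ""
--                 in_quote = False
--             else:
--                 in_quote = True
--         elif in_quote:
--             current_quote += char
--         i += 1
--
--     if len(quoted_parts) >= 1:
--         components["operator"] = quoted_parts[0]
--     if len(quoted_parts) >= 2:
--         components["actions"] = quoted_parts[1]
--
--     return components
-- ===== SOURCE B (Python) =====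
-- def parse_secrule_components(rule: str) -> dict:
--     """Parse a SecRule into its components."""
--     rule_content = rule[7:].strip()
--
--     quote_pos = rule_content.find('"')
--     if quote_pos == -1:
--         return {"error": "No quoted sections found"}
--
--     components = {"variables": rule_content[:quote_pos].strip()}
--
--     # One scan: indices of every unescaped quote (previous char is not a backslash).
--     idxs = []
--     prev = None
--     for i, ch in enumerate(rule_content):
--         if ch == '"' and prev != "\\":
--             idxs.append(i)
--         prev = ch
--
--     # Pair the indices two at a time; each complete pair delimits a quoted part.
--     quoted_parts = []
--     k = 0
--     while k + 1 < len(idxs):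
--         quoted_parts.append(rule_content[idxs[k] + 1 : idxs[k + 1]])
--         k += 2
--
--     if quoted_parts:
--         components["operator"] = quoted_parts[0]
--     if len(quoted_parts) >= 2:
--         components["actions"] = quoted_parts[1]
--     return components
-- ===== Notes on version B (the rewrite author's own statement) =====
-- stated objective: alternative
-- what changed: Replaces A's in_quote/current_quote state machine with one scan that collects the indices of unescaped quotes, then pairs them two at a time and slices the string between each pair.
import Mathlib
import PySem

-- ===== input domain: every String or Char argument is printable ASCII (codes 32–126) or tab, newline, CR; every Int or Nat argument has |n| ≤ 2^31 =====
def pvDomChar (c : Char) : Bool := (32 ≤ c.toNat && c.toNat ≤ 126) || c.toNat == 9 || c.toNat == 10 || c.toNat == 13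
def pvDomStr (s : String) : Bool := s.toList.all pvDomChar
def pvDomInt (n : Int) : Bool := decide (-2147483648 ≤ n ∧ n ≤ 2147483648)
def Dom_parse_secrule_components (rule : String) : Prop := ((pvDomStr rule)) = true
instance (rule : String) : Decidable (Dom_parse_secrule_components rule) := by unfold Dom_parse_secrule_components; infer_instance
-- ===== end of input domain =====

-- B is an alternative decomposition: one scan collecting the indices of unescaped quotes,
-- then slicing the string between paired indices, instead of A's in_quote state machine.

-- ===== PORT A =====
-- A's while loop: state = (quoted_parts acc, in_quote, current_quote, previous char)
def pvLoopA (acc : List (List Char)) (inq : Bool) (cur : List Char)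
    (p : Option Char) : List Char → List (List Char)
  | [] => acc
  | c :: cs =>
    if c = '"' ∧ p ≠ some '\\' then
      if inq then pvLoopA (acc ++ [cur]) false [] (some c) cs
      else pvLoopA acc true cur (some c) cs
    else if inq then pvLoopA acc inq (cur ++ [c]) (some c) cs
    else pvLoopA acc inq cur (some c) cs

def parse_secrule_components (rule : String) : List (String × String) :=
  let rc := PySem.Chars.strip (PySem.List.slice rule.toList (some 7) none)
  let qp := PySem.Chars.find rc ['"']
  if qp = -1 then [("error", "No quoted sections found")]
  else
    let vars := PySem.Chars.strip (PySem.List.slice rc none (some qp))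
    let quoted := pvLoopA [] false [] none rc
    let comps := [("variables", String.ofList vars)]
    let comps := if 1 ≤ quoted.length then comps ++ [("operator", String.ofList quoted[0]!)] else comps
    if 2 ≤ quoted.length then comps ++ [("actions", String.ofList quoted[1]!)] else comps

-- ===== PORT B =====
-- B's first scan: indices of unescaped quotes (prev char tracked, k = current index)
def pvIdxs (p : Option Char) (k : Nat) : List Char → List Nat
  | [] => []
  | c :: cs =>
    if c = '"' ∧ p ≠ some '\\' then k :: pvIdxs (some c) (k + 1) cs
    else pvIdxs (some c) (k + 1) cs

-- B's second loop: consume the index list two at a time, slicing between each pair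
def pvPairSlices (rc : List Char) : List Nat → List (List Char)
  | s :: e :: rest =>
      PySem.List.slice rc (some ((s : Int) + 1)) (some (e : Int)) :: pvPairSlices rc rest
  | _ => []

def parse_secrule_components_alt (rule : String) : List (String × String) :=
  let rc := PySem.Chars.strip (PySem.List.slice rule.toList (some 7) none)
  let qp := PySem.Chars.find rc ['"']
  if qp = -1 then [("error", "No quoted sections found")]
  else
    let vars := PySem.Chars.strip (PySem.List.slice rc none (some qp))
    let quoted := pvPairSlices rc (pvIdxs none 0 rc)
    let comps := [("variables", String.ofList vars)]
    let comps := if quoted ≠ [] then comps ++ [("operator", String.ofList quoted[0]!)] else comps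
    if 2 ≤ quoted.length then comps ++ [("actions", String.ofList quoted[1]!)] else comps

-- ===== PRECONDITION & SPEC =====
def Spec_parse_secrule_components (rule : String) (out : List (String × String)) : Prop := out = parse_secrule_components_alt rule
instance (rule : String) (out : List (String × String)) : Decidable (Spec_parse_secrule_components rule out) := by unfold Spec_parse_secrule_components; infer_instance

-- ===== CLAIM (what is proved, stated in full; the proofs are below) =====
def Claim_equal_parse_secrule_components : Prop := ∀ (rule : String), Dom_parse_secrule_components rule → Spec_parse_secrule_components rule (parse_secrule_components rule)

-- ===== LEMMAS AND PROOFS =====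

-- pvPairSlices on a cons-cons index list, in drop/take form
lemma pvPairSlices_cons_cons (rc : List Char) (s e : Nat) (rest : List Nat) :
    pvPairSlices rc (s :: e :: rest) =
      ((rc.drop (s + 1)).take (e - (s + 1))) :: pvPairSlices rc rest := by
  have h1 : ((s : Int) + 1) = ((s + 1 : Nat) : Int) := by push_cast; ring
  simp only [pvPairSlices, h1, PySem.List.slice_natCast]

-- shifting every index by 1 and prepending a char leaves the pair slices unchanged
lemma pvPairSlices_shift (x : Char) (rc : List Char) :
    ∀ l : List Nat, pvPairSlices (x :: rc) (l.map (· + 1)) = pvPairSlices rc l := by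
  have key : ∀ (n : Nat) (l : List Nat), l.length ≤ n →
      pvPairSlices (x :: rc) (l.map (· + 1)) = pvPairSlices rc l := by
    intro n
    induction n with
    | zero =>
      rintro (_ | ⟨a, l⟩) h
      · simp [pvPairSlices]
      · simp at h
    | succ n ih =>
      rintro (_ | ⟨a, (_ | ⟨b, l⟩)⟩) h
      · simp [pvPairSlices]
      · simp [pvPairSlices]
      · simp only [List.map_cons]
        rw [pvPairSlices_cons_cons, pvPairSlices_cons_cons,
          ih l (by simp at h; omega)]
        have h2 : b + 1 - (a + 1 + 1) = b - (a + 1) := by omega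
        simp [h2]
  exact fun l => key l.length l le_rfl

-- pushing the start index up by one shifts every collected index by one
lemma pvIdxs_shift (cs : List Char) : ∀ (p : Option Char) (k : Nat),
    pvIdxs p (k + 1) cs = (pvIdxs p k cs).map (· + 1) := by
  induction cs with
  | nil => intro p k; simp [pvIdxs]
  | cons c cs ih =>
    intro p k
    by_cases hq : c = '"' ∧ p ≠ some '\\'
    · simp [pvIdxs, hq, ih]
    · simp [pvIdxs, hq, ih]

-- main invariant: A's state machine equals B's pair-slicing, in both loop states
lemma pvLoop_eq (cs : List Char) : ∀ (p : Option Char) (acc : List (List Char)) (cur : List Char),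
    (pvLoopA acc false [] p cs = acc ++ pvPairSlices cs (pvIdxs p 0 cs)) ∧
    (pvLoopA acc true cur p cs =
      acc ++ (match pvIdxs p 0 cs with
              | [] => []
              | e :: rest => (cur ++ cs.take e) :: pvPairSlices cs rest)) := by
  induction cs with
  | nil => intro p acc cur; simp [pvLoopA, pvIdxs, pvPairSlices]
  | cons c cs ih =>
    intro p acc cur
    have hsh : pvIdxs (some c) 1 cs = (pvIdxs (some c) 0 cs).map (· + 1) :=
      pvIdxs_shift cs (some c) 0
    by_cases hq : c = '"' ∧ p ≠ some '\\'
    · constructor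
      · rw [show pvLoopA acc false [] p (c :: cs) = pvLoopA acc true [] (some c) cs by
          simp [pvLoopA, hq]]
        rw [(ih (some c) acc []).2]
        rw [show pvIdxs p 0 (c :: cs) = 0 :: pvIdxs (some c) 1 cs by simp [pvIdxs, hq]]
        rw [hsh]
        cases hl : pvIdxs (some c) 0 cs with
        | nil => simp [pvPairSlices]
        | cons e rest =>
          simp only [List.map_cons]
          rw [pvPairSlices_cons_cons]
          rw [pvPairSlices_shift]
          simp
      · rw [show pvLoopA acc true cur p (c :: cs) = pvLoopA (acc ++ [cur]) false [] (some c) cs by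
          simp [pvLoopA, hq]]
        rw [(ih (some c) (acc ++ [cur]) []).1]
        rw [show pvIdxs p 0 (c :: cs) = 0 :: pvIdxs (some c) 1 cs by simp [pvIdxs, hq]]
        rw [hsh]
        simp [pvPairSlices_shift]
    · have hidx : pvIdxs p 0 (c :: cs) = (pvIdxs (some c) 0 cs).map (· + 1) := by
        simp [pvIdxs, hq, hsh]
      constructor
      · rw [show pvLoopA acc false [] p (c :: cs) = pvLoopA acc false [] (some c) cs by
          simp [pvLoopA, hq]]
        rw [(ih (some c) acc cur).1, hidx, pvPairSlices_shift]
      · rw [show pvLoopA acc true cur p (c :: cs) = pvLoopA acc true (cur ++ [c]) (some c) cs by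
          simp [pvLoopA, hq]]
        rw [(ih (some c) acc (cur ++ [c])).2, hidx]
        cases hl : pvIdxs (some c) 0 cs with
        | nil => simp
        | cons e rest =>
          simp only [List.map_cons]
          rw [pvPairSlices_shift]
          simp

-- ===== VERDICT (by name: the statement is the Claim_ definition above) =====
theorem parse_secrule_components_spec : Claim_equal_parse_secrule_components := by
  unfold Claim_equal_parse_secrule_components Spec_parse_secrule_components
  intro rule _
  unfold parse_secrule_components parse_secrule_components_alt
  set rc := PySem.Chars.strip (PySem.List.slice rule.toList (some 7) none) with hrc
  by_cases h : PySem.Chars.find rc ['"'] = -1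
  · simp [h]
  · simp only [h, if_false]
    have hmain : pvLoopA [] false [] none rc = pvPairSlices rc (pvIdxs none 0 rc) := by
      simpa using (pvLoop_eq rc none [] []).1
    rw [hmain]
    generalize pvPairSlices rc (pvIdxs none 0 rc) = X
    cases X with
    | nil => simp
    | cons a t => cases t <;> simp
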